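-- pv_equiv track=rewrite | github.com/peterjc/picobio | blast/blast_most_matched.py | cull_runs
-- ===== SOURCE A (Python) =====
-- def cull_runs(set_of_points, min_run):
--     answer = set()
--     start = None
--     end = None
--     for i in sorted(set_of_points):
--         if start is None:
--             # very first run
--             start = i
--             end = i
--         elif i == end + 1:
--             # Continues run
--             end = i
--         else:
--             # End of run.
--             if end - start + 1 >= min_run:
--                 answer.update(range(start, end + 1))
--             start = i
--             end = i
--     # Final run,
--     if start and end and end - start + 1 >= min_run:
--         answer.update(range(start, end + 1))
--     return answer
-- ===== SOURCE B (Python) =====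
-- def cull_runs(set_of_points, min_run):
--     # Membership-set algorithm: instead of sorting the whole input and
--     # streaming it through a state machine, build a hash set, find each run
--     # start (a point whose predecessor is absent), walk forward through the
--     # set to the run end, and keep the runs of qualifying length.
--     points = set(set_of_points)
--     answer = set()
--     for a in sorted(p for p in points if p - 1 not in points):
--         b = a
--         while b + 1 in points:
--             b += 1
--         if b - a + 1 >= min_run:
--             answer.update(range(a, b + 1))
--     return answer
-- ===== Notes on version B (the rewrite author's own statement) =====
-- stated objective: alternative
-- what changed: A sorts the whole input and streams it through a start/end state machine with None sentinels and a duplicated flush; B instead builds a membership set, finds each run start (a point whose predecessor is absent), walks forward through the set to the run end, and keeps qualifying runs, also dropping A's buggy truthiness test on the final run.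
-- intended difference: On duplicate-free inputs whose final (maximum-ending) run of consecutive points has length >= min_run but starts or ends at the value 0, A's final-flush test 'start and end' treats the integer 0 as falsy and silently drops that whole run; B keeps it, since only the run's length should decide. — e.g. on cull_runs([0, 1, 2], 2): A returns [], B returns [0, 1, 2]
import Mathlib
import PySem

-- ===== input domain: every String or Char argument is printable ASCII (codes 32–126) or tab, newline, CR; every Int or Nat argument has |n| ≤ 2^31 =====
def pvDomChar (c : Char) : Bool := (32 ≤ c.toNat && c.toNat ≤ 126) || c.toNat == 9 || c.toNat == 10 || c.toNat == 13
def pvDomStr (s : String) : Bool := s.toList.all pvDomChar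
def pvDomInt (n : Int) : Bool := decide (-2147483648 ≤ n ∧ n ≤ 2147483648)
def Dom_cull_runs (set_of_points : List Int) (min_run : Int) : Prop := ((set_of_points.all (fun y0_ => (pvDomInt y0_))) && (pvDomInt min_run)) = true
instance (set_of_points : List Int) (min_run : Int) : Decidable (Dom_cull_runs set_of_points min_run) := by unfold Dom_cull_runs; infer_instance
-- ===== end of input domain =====

-- B replaces A's sort-everything-and-stream state machine by a membership-set algorithm
-- (find each run start, walk forward through the set); B drops A's accidental truthiness
-- test that loses a final run touching 0 (stated in D_cull_runs below).

-- ===== PORT A =====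
-- loop body of A's 'for i in sorted(set_of_points)': state (answer, start, end)
def cullStep (min_run : Int) (st : PySem.Set Int × Option Int × Option Int) (i : Int) :
    PySem.Set Int × Option Int × Option Int :=
  match st with
  | (ans, some s, some e) =>
      if i = e + 1 then (ans, some s, some i)              -- continues run
      else if min_run ≤ e - s + 1 then                     -- end of run
        (PySem.Set.update ans (PySem.List.pyRange s (e + 1) 1), some i, some i)
      else (ans, some i, some i)
  | (ans, _, _) => (ans, some i, some i)                   -- start is None: very first run

def cull_runs (set_of_points : List Int) (min_run : Int) : List Int :=
  match (PySem.List.sorted set_of_points (fun x => x) false).foldl (cullStep min_run)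
      (PySem.Set.empty, none, none) with
  | (ans, some s, some e) =>
      -- Python's 'if start and end and end - start + 1 >= min_run': 0 is falsy
      if s ≠ 0 ∧ e ≠ 0 ∧ min_run ≤ e - s + 1 then
        PySem.Set.update ans (PySem.List.pyRange s (e + 1) 1)
      else ans
  | (ans, _, _) => ans

-- ===== PORT B =====
-- Source B's 'while b + 1 in points: b += 1'; the fuel argument only makes the loop total
-- (each step moves to a new member of points, so |points| steps always suffice)
def walkEnd (points : List Int) : Nat → Int → Int
  | 0, b => b
  | fuel + 1, b => if (b + 1) ∈ points then walkEnd points fuel (b + 1) else b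

def cull_runs_alt (set_of_points : List Int) (min_run : Int) : List Int :=
  let points := PySem.Set.ofList set_of_points
  let starts := PySem.List.sorted (points.filter (fun p => decide ((p - 1) ∉ points)))
    (fun x => x) false
  starts.foldl (fun answer a =>
    let b := walkEnd points points.length a
    if min_run ≤ b - a + 1 then PySem.Set.update answer (PySem.List.pyRange a (b + 1) 1)
    else answer) PySem.Set.empty

-- ===== PRECONDITION & SPEC =====
-- Pre_ excludes lists with repeated values: the argument is meant to be a set of points
-- (A's caller passes a set), and A's splitting of a run at every repeated value is an
-- accident of its sorted-stream bookkeeping that no caller would specify.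
def Pre_cull_runs (set_of_points : List Int) (min_run : Int) : Prop := set_of_points.Nodup
instance (set_of_points : List Int) (min_run : Int) : Decidable (Pre_cull_runs set_of_points min_run) := by
  unfold Pre_cull_runs; infer_instance

def pvWitness_cull_runs : List Int × Int := ([5, 1, 2], 2)

-- On inputs whose final (maximum-ending) run of consecutive points qualifies
-- (length >= min_run) but starts or ends at the value 0, A's final test 'start and end'
-- treats the int 0 as falsy and silently drops that whole run; B keeps it, since only
-- the run's length should decide.
def D_cull_runs (set_of_points : List Int) (min_run : Int) : Prop :=
  ∃ b ∈ set_of_points, (∀ x ∈ set_of_points, x ≤ b) ∧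
    ∃ a ∈ set_of_points, (a - 1) ∉ set_of_points ∧
      (∀ x ∈ set_of_points, a ≤ x → x < b → x + 1 ∈ set_of_points) ∧
      a * b = 0 ∧ min_run ≤ b - a + 1
instance (set_of_points : List Int) (min_run : Int) : Decidable (D_cull_runs set_of_points min_run) := by
  unfold D_cull_runs; infer_instance

def Spec_cull_runs (set_of_points : List Int) (min_run : Int) (out : List Int) : Prop :=
  ¬ D_cull_runs set_of_points min_run → out = cull_runs_alt set_of_points min_run
instance (set_of_points : List Int) (min_run : Int) (out : List Int) : Decidable (Spec_cull_runs set_of_points min_run out) := by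
  unfold Spec_cull_runs; infer_instance

def pvDiffWitness_cull_runs : List Int × Int := ([0, 1, 2], 2)
def pvDiffWitnessOut_cull_runs : (List Int) × (List Int) := ([], [0, 1, 2])

-- ===== CLAIM (what is proved, stated in full; the proofs are below) =====
def Claim_unchanged_cull_runs : Prop := ∀ (set_of_points : List Int) (min_run : Int), Dom_cull_runs set_of_points min_run → Pre_cull_runs set_of_points min_run → Spec_cull_runs set_of_points min_run (cull_runs set_of_points min_run)
def Claim_changed_cull_runs : Prop := Dom_cull_runs (pvDiffWitness_cull_runs.1) (pvDiffWitness_cull_runs.2) ∧ Pre_cull_runs (pvDiffWitness_cull_runs.1) (pvDiffWitness_cull_runs.2) ∧ D_cull_runs (pvDiffWitness_cull_runs.1) (pvDiffWitness_cull_runs.2) ∧ cull_runs (pvDiffWitness_cull_runs.1) (pvDiffWitness_cull_runs.2) = pvDiffWitnessOut_cull_runs.1 ∧ cull_runs_alt (pvDiffWitness_cull_runs.1) (pvDiffWitness_cull_runs.2) = pvDiffWitnessOut_cull_runs.2 ∧ pvDiffWitnessOut_cull_runs.1 ≠ pvDiffWitnessOut_cull_runs.2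
def Claim_exact_cull_runs : Prop := ∀ (set_of_points : List Int) (min_run : Int), Dom_cull_runs set_of_points min_run → Pre_cull_runs set_of_points min_run → D_cull_runs set_of_points min_run → cull_runs set_of_points min_run ≠ cull_runs_alt set_of_points min_run

-- ===== LEMMAS AND PROOFS =====

-- run-length encoding step: (start, length) pairs, newest at the head
def rleStep (rruns : List (Int × Int)) (p : Int) : List (Int × Int) :=
  match rruns with
  | (s, n) :: t => if p = s + n then (s, n + 1) :: t else (p, 1) :: (s, n) :: t
  | [] => [(p, 1)]

def keepLong (min_run : Int) (runs : List (Int × Int)) : List Int :=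
  (runs.filter (fun r => decide (min_run ≤ r.2))).flatMap
    (fun r => PySem.List.pyRange r.1 (r.1 + r.2) 1)

-- a closed piece of S: nonempty, its whole interval lies in S, maximal on both sides
def goodPiece (S : List Int) (q : Int × Int) : Prop :=
  1 ≤ q.2 ∧ (∀ c : Int, q.1 ≤ c → c ≤ q.1 + q.2 - 1 → c ∈ S) ∧
    (q.1 - 1) ∉ S ∧ (q.1 + q.2) ∉ S

lemma ofList_append_int (u v : List Int) :
    PySem.Set.ofList (u ++ v) = PySem.Set.update (PySem.Set.ofList u) v := by
  rw [PySem.Set.ofList_eq_foldl, PySem.Set.ofList_eq_foldl, List.foldl_append]; rfl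

lemma keepLong_append (m : Int) (u v : List (Int × Int)) :
    keepLong m (u ++ v) = keepLong m u ++ keepLong m v := by
  simp [keepLong, List.filter_append]

lemma keepLong_singleton (m s n : Int) :
    keepLong m [(s, n)] = if m ≤ n then PySem.List.pyRange s (s + n) 1 else [] := by
  by_cases h : m ≤ n <;> simp [keepLong, h]

lemma keepLong_cons (m : Int) (s n : Int) (P : List (Int × Int)) :
    keepLong m ((s, n) :: P)
      = (if m ≤ n then PySem.List.pyRange s (s + n) 1 else []) ++ keepLong m P := by
  by_cases h : m ≤ n <;> simp [keepLong, h]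

-- A's fold over the tail of the sorted list computes the RLE fold (no sortedness needed)
lemma fold_corr (m : Int) : ∀ (L : List Int) (rr : List (Int × Int)) (s n : Int), 1 ≤ n →
    L.foldl (cullStep m) (PySem.Set.ofList (keepLong m rr.reverse), some s, some (s + n - 1))
    = match L.foldl rleStep ((s, n) :: rr) with
      | (s', n') :: rr' => (PySem.Set.ofList (keepLong m rr'.reverse), some s', some (s' + n' - 1))
      | [] => (PySem.Set.empty, none, none) := by
  intro L
  induction L with
  | nil => intro rr s n hn; rfl
  | cons p L' ih =>
    intro rr s n hn
    simp only [List.foldl_cons]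
    by_cases hc : p = s + n
    · have h1 : cullStep m (PySem.Set.ofList (keepLong m rr.reverse), some s, some (s + n - 1)) p
          = (PySem.Set.ofList (keepLong m rr.reverse), some s, some (s + (n + 1) - 1)) := by
        have he : p = (s + n - 1) + 1 := by omega
        have hp : s + (n + 1) - 1 = p := by omega
        rw [hp]
        simp [cullStep, he]
      have h2 : rleStep ((s, n) :: rr) p = (s, n + 1) :: rr := by simp [rleStep, hc]
      rw [h1, h2, ih rr s (n + 1) (by omega)]
    · have hne : ¬ (p = (s + n - 1) + 1) := by omega
      have h2 : rleStep ((s, n) :: rr) p = (p, 1) :: (s, n) :: rr := by simp [rleStep, hc]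
      have e1 : s + n - 1 + 1 = s + n := by ring
      have e2 : p + 1 - 1 = p := by ring
      rw [h2]
      by_cases hm : m ≤ n
      · have h1 : cullStep m (PySem.Set.ofList (keepLong m rr.reverse), some s, some (s + n - 1)) p
            = (PySem.Set.ofList (keepLong m (((s, n) :: rr).reverse)), some p, some (p + 1 - 1)) := by
          have hmn : m ≤ (s + n - 1) - s + 1 := by omega
          simp only [cullStep, if_pos hmn, e1, e2]
          rw [if_neg hc]
          rw [List.reverse_cons, keepLong_append, keepLong_singleton, if_pos hm, ofList_append_int]
        rw [h1, ih ((s, n) :: rr) p 1 (by omega)]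
      · have h1 : cullStep m (PySem.Set.ofList (keepLong m rr.reverse), some s, some (s + n - 1)) p
            = (PySem.Set.ofList (keepLong m (((s, n) :: rr).reverse)), some p, some (p + 1 - 1)) := by
          have hmn : ¬ (m ≤ (s + n - 1) - s + 1) := by omega
          simp only [cullStep, if_neg hmn, e1, e2]
          rw [if_neg hc]
          rw [List.reverse_cons, keepLong_append, keepLong_singleton, if_neg hm]
          simp
        rw [h1, ih ((s, n) :: rr) p 1 (by omega)]

-- full invariant of the RLE fold over a strictly ascending list
lemma rle_inv (L : List Int) : ∀ (done : List Int) (rr : List (Int × Int)) (s n : Int),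
    1 ≤ n →
    List.Pairwise (· < ·) (done ++ L) →
    (∀ x ∈ done, x ≤ s + n - 1) →
    (∀ c : Int, s ≤ c → c ≤ s + n - 1 → c ∈ done) →
    (s - 1) ∉ done ++ L →
    (∀ q ∈ rr, goodPiece (done ++ L) q) →
    List.Pairwise (fun a b => b.1 + b.2 < a.1) ((s, n) :: rr) →
    (∀ p : Int, (p ∈ done ∧ (p - 1) ∉ done ++ L) ↔ (p = s ∨ p ∈ rr.map Prod.fst)) →
    ∃ s' n' rr',
      L.foldl rleStep ((s, n) :: rr) = (s', n') :: rr' ∧ 1 ≤ n' ∧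
      (∀ x ∈ done ++ L, x ≤ s' + n' - 1) ∧
      (∀ c : Int, s' ≤ c → c ≤ s' + n' - 1 → c ∈ done ++ L) ∧
      (s' - 1) ∉ done ++ L ∧
      (∀ q ∈ rr', goodPiece (done ++ L) q) ∧
      List.Pairwise (fun a b => b.1 + b.2 < a.1) ((s', n') :: rr') ∧
      (∀ p : Int, (p ∈ done ++ L ∧ (p - 1) ∉ done ++ L) ↔ (p = s' ∨ p ∈ rr'.map Prod.fst)) := by
  induction L with
  | nil =>
    intro done rr s n hn hpw hub hrun hs1 hgood hpair hchar
    exact ⟨s, n, rr, rfl, hn, by simpa using hub, by simpa using hrun, hs1, hgood, hpair,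
      by simpa using hchar⟩
  | cons p L' ih =>
    intro done rr s n hn hpw hub hrun hs1 hgood hpair hchar
    have hassoc : done ++ p :: L' = (done ++ [p]) ++ L' := by simp
    have hpw' : List.Pairwise (· < ·) ((done ++ [p]) ++ L') := by rwa [hassoc] at hpw
    have hdp : ∀ x ∈ done, x < p := by
      intro x hx
      exact (List.pairwise_append.mp hpw).2.2 x hx p (List.mem_cons_self ..)
    have hpL' : ∀ x ∈ L', p < x := by
      have := (List.pairwise_append.mp hpw).2.1
      exact fun x hx => (List.pairwise_cons.mp this).1 x hx
    have hrrlt : ∀ q ∈ rr, q.1 + q.2 < s := fun q hq => (List.pairwise_cons.mp hpair).1 q hq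
    have hep : s + n - 1 < p := hdp _ (hrun (s + n - 1) (by omega) (by omega))
    simp only [List.foldl_cons]
    by_cases hc : p = s + n
    · -- run continues
      have h2 : rleStep ((s, n) :: rr) p = (s, n + 1) :: rr := by simp [rleStep, hc]
      rw [h2]
      obtain ⟨s', n', rr', heq, h1, h2', h3, h4, h5, h6, h7⟩ :=
        ih (done ++ [p]) rr s (n + 1) (by omega) hpw'
          (by intro x hx; rcases List.mem_append.mp hx with h | h
              · have := hub x h; omega
              · rw [List.mem_singleton] at h; omega)
          (by intro c hc1 hc2
              by_cases hcb : c ≤ s + n - 1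
              · exact List.mem_append.mpr (Or.inl (hrun c hc1 hcb))
              · have : c = p := by omega
                simp [this])
          (by rw [← hassoc]; exact hs1)
          (by intro q hq; rw [← hassoc]; exact hgood q hq)
          (by exact List.pairwise_cons.mpr ⟨hrrlt, (List.pairwise_cons.mp hpair).2⟩)
          (by intro p'
              rw [← hassoc]
              constructor
              · rintro ⟨hmem, hnot⟩
                rcases List.mem_append.mp hmem with h | h
                · exact (hchar p').mp ⟨h, hnot⟩
                · exfalso
                  simp at h
                  subst h
                  exact hnot (List.mem_append.mpr (Or.inl (hrun (p' - 1) (by omega) (by omega))))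
              · intro h
                obtain ⟨hmem, hnot⟩ := (hchar p').mpr h
                exact ⟨List.mem_append.mpr (Or.inl hmem), hnot⟩)
      exact ⟨s', n', rr', heq, h1, by rwa [← hassoc] at h2', by rwa [← hassoc] at h3,
        by rwa [← hassoc] at h4, by rwa [← hassoc] at h5, h6, by rwa [← hassoc] at h7⟩
    · -- new run starts at p (p > s + n since p > s + n - 1 and p ≠ s + n)
      have hgt : s + n < p := by omega
      have h2 : rleStep ((s, n) :: rr) p = (p, 1) :: (s, n) :: rr := by simp [rleStep, hc]
      rw [h2]
      have hsnS : (s + n) ∉ (done ++ [p]) ++ L' := by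
        intro h
        rcases List.mem_append.mp h with h | h
        · rcases List.mem_append.mp h with h | h
          · have := hub _ h; omega
          · rw [List.mem_singleton] at h; omega
        · have := hpL' _ h; omega
      obtain ⟨s', n', rr', heq, h1, h2', h3, h4, h5, h6, h7⟩ :=
        ih (done ++ [p]) ((s, n) :: rr) p 1 (by omega) hpw'
          (by intro x hx; rcases List.mem_append.mp hx with h | h
              · have := hub x h; omega
              · rw [List.mem_singleton] at h; omega)
          (by intro c hc1 hc2
              have : c = p := by omega
              simp [this])
          (by intro h
              rcases List.mem_append.mp h with h | h
              · rcases List.mem_append.mp h with h | h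
                · have := hub _ h; omega
                · rw [List.mem_singleton] at h; omega
              · have := hpL' _ h; omega)
          (by intro q hq
              rcases List.mem_cons.mp hq with h | h
              · subst h
                refine ⟨hn, ?_, ?_, hsnS⟩
                · intro c hc1 hc2
                  exact List.mem_append.mpr (Or.inl (List.mem_append.mpr (Or.inl (hrun c hc1 hc2))))
                · rw [← hassoc]; exact hs1
              · have hg := hgood q h
                exact ⟨hg.1, fun c hc1 hc2 => by rw [← hassoc]; exact hg.2.1 c hc1 hc2,
                  by rw [← hassoc]; exact hg.2.2.1, by rw [← hassoc]; exact hg.2.2.2⟩)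
          (by refine List.pairwise_cons.mpr ⟨?_, hpair⟩
              intro q hq
              rcases List.mem_cons.mp hq with h | h
              · subst h; exact hgt
              · have := hrrlt q h; omega)
          (by intro p'
              by_cases hp' : p' = p
              · subst hp'
                constructor
                · intro _; left; rfl
                · intro _
                  refine ⟨by simp, ?_⟩
                  intro h
                  rcases List.mem_append.mp h with h | h
                  · rcases List.mem_append.mp h with h | h
                    · have := hub _ h; omega
                    · rw [List.mem_singleton] at h; omega
                  · have := hpL' _ h; omega
              · constructor
                · rintro ⟨hmem, hnot⟩
                  rcases List.mem_append.mp hmem with h | h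
                  · right
                    rw [← hassoc] at hnot
                    rcases (hchar p').mp ⟨h, hnot⟩ with h' | h'
                    · simp [h']
                    · simp only [List.map_cons]
                      right; exact h'
                  · exfalso; simp at h; exact hp' h
                · intro h
                  rcases h with h | h
                  · exact absurd h hp'
                  · simp only [List.map_cons, List.mem_cons] at h
                    rcases h with h | h
                    · obtain ⟨hmem, hnot⟩ := (hchar p').mpr (Or.inl h)
                      exact ⟨List.mem_append.mpr (Or.inl hmem), by rwa [← hassoc]⟩
                    · obtain ⟨hmem, hnot⟩ := (hchar p').mpr (Or.inr h)
                      exact ⟨List.mem_append.mpr (Or.inl hmem), by rwa [← hassoc]⟩)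
      exact ⟨s', n', rr', heq, h1, by rwa [← hassoc] at h2', by rwa [← hassoc] at h3,
        by rwa [← hassoc] at h4, by rwa [← hassoc] at h5, h6, by rwa [← hassoc] at h7⟩

-- the walk of B reaches the end of a maximal interval (fuel permitting)
lemma walkEnd_reaches (pts : List Int) : ∀ (fuel : Nat) (b e : Int), b ≤ e →
    (∀ c : Int, b ≤ c → c ≤ e → c ∈ pts) → (e + 1) ∉ pts → (e - b).toNat < fuel →
    walkEnd pts fuel b = e := by
  intro fuel
  induction fuel with
  | zero => intro b e _ _ _ h; omega
  | succ f ih =>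
    intro b e hbe hint hend hf
    by_cases hbe' : b = e
    · subst hbe'
      simp [walkEnd, hend]
    · have hb1 : (b + 1) ∈ pts := hint (b + 1) (by omega) (by omega)
      simp only [walkEnd, if_pos hb1]
      exact ih (b + 1) e (by omega) (fun c hc1 hc2 => hint c (by omega) hc2) hend (by omega)

-- B's flushing fold over a piece list is keepLong
lemma flush_fold (m : Int) : ∀ (P : List (Int × Int)) (u : List Int),
    P.foldl (fun ans q =>
        if m ≤ q.2 then PySem.Set.update ans (PySem.List.pyRange q.1 (q.1 + q.2) 1) else ans)
      (PySem.Set.ofList u)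
    = PySem.Set.ofList (u ++ keepLong m P) := by
  intro P
  induction P with
  | nil => intro u; simp [keepLong]
  | cons q P' ih =>
    intro u
    obtain ⟨s, n⟩ := q
    simp only [List.foldl_cons]
    by_cases hm : m ≤ n
    · have : (if m ≤ n then PySem.Set.update (PySem.Set.ofList u) (PySem.List.pyRange s (s + n) 1)
            else PySem.Set.ofList u)
          = PySem.Set.ofList (u ++ PySem.List.pyRange s (s + n) 1) := by
        rw [if_pos hm, ofList_append_int]
      rw [this, ih, keepLong_cons, if_pos hm, List.append_assoc]
    · rw [if_neg hm, ih, keepLong_cons, if_neg hm, List.nil_append]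

-- the main correspondence: with no duplicates, outside D_ the programs agree,
-- inside D_ they always differ
lemma main_corr (xs : List Int) (m : Int) (hnd : xs.Nodup) :
    (¬ D_cull_runs xs m → cull_runs xs m = cull_runs_alt xs m) ∧
    (D_cull_runs xs m → cull_runs xs m ≠ cull_runs_alt xs m) := by
  have hmem : ∀ x, x ∈ PySem.List.sorted xs (fun x => x) false ↔ x ∈ xs :=
    PySem.List.mem_sorted xs (fun x => x) false
  have hndL : (PySem.List.sorted xs (fun x => x) false).Nodup :=
    ((PySem.List.sorted_perm xs (fun x => x) false).nodup_iff).mpr hnd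
  have hpw0 : List.Pairwise (· ≤ ·) (PySem.List.sorted xs (fun x => x) false) :=
    PySem.List.sorted_pairwise xs (fun x => x)
  have hpts : PySem.Set.ofList xs = xs := PySem.Set.ofList_eq_self_of_nodup xs hnd
  cases hE : PySem.List.sorted xs (fun x => x) false with
  | nil =>
    have hxs : xs = [] := (PySem.List.sorted_eq_nil_iff xs (fun x => x) false).mp hE
    subst hxs
    constructor
    · intro _; rfl
    · rintro ⟨b, hb, _⟩ _; simp at hb
  | cons p L' =>
    rw [hE] at hpw0 hndL
    have hpwlt : List.Pairwise (· < ·) (p :: L') := by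
      have := hpw0.and hndL
      exact this.imp (fun h => lt_of_le_of_ne h.1 h.2)
    have hcons : [p] ++ L' = p :: L' := by simp
    have hmem' : ∀ x, x ∈ p :: L' ↔ x ∈ xs := by rw [← hE]; exact hmem
    have hpL' : ∀ x ∈ L', p < x := fun x hx => (List.pairwise_cons.mp hpwlt).1 x hx
    obtain ⟨s', n', rr', heq, hn1, hub, hrun, hs1, hgood, hpair, hchar⟩ :=
      rle_inv L' [p] [] p 1 le_rfl (by rwa [hcons])
        (by intro x hx; rw [List.mem_singleton] at hx; omega)
        (by intro c h1 h2
            have : c = p := by omega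
            rw [this]; exact List.mem_singleton_self p)
        (by rw [hcons]
            intro h
            rcases List.mem_cons.mp h with h | h
            · omega
            · have := hpL' _ h; omega)
        (by intro q hq; simp at hq)
        (by simp)
        (by intro p'
            constructor
            · rintro ⟨h, _⟩; left; exact (List.mem_singleton.mp h)
            · rintro (h | h)
              · rw [h]
                refine ⟨List.mem_singleton_self p, ?_⟩
                rw [hcons]
                intro h
                rcases List.mem_cons.mp h with h | h
                · omega
                · have := hpL' _ h; omega
              · simp at h)
    rw [hcons] at hub hrun hs1 hgood hchar
    -- membership facts relative to xs
    have hubx : ∀ x ∈ xs, x ≤ s' + n' - 1 := fun x hx => hub x ((hmem' x).mpr hx)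
    have hrunx : ∀ c : Int, s' ≤ c → c ≤ s' + n' - 1 → c ∈ xs :=
      fun c h1 h2 => (hmem' c).mp (hrun c h1 h2)
    have hs1x : (s' - 1) ∉ xs := fun h => hs1 ((hmem' _).mpr h)
    have hgoodx : ∀ q ∈ rr', 1 ≤ q.2 ∧ (∀ c : Int, q.1 ≤ c → c ≤ q.1 + q.2 - 1 → c ∈ xs) ∧
        (q.1 - 1) ∉ xs ∧ (q.1 + q.2) ∉ xs := by
      intro q hq
      obtain ⟨a1, a2, a3, a4⟩ := hgood q hq
      exact ⟨a1, fun c h1 h2 => (hmem' c).mp (a2 c h1 h2), fun h => a3 ((hmem' _).mpr h),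
        fun h => a4 ((hmem' _).mpr h)⟩
    have hcharx : ∀ p' : Int, (p' ∈ xs ∧ (p' - 1) ∉ xs) ↔ (p' = s' ∨ p' ∈ rr'.map Prod.fst) := by
      intro p'
      rw [← hmem' p', ← hmem' (p' - 1)]
      exact hchar p'
    have hrrlt : ∀ q ∈ rr', q.1 + q.2 < s' := fun q hq => (List.pairwise_cons.mp hpair).1 q hq
    -- the full piece list, in ascending order
    set P : List (Int × Int) := rr'.reverse ++ [(s', n')] with hP
    -- compute A
    have hA : cull_runs xs m =
        (if s' ≠ 0 ∧ s' + n' - 1 ≠ 0 ∧ m ≤ (s' + n' - 1) - s' + 1 then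
          PySem.Set.update (PySem.Set.ofList (keepLong m rr'.reverse))
            (PySem.List.pyRange s' ((s' + n' - 1) + 1) 1)
        else PySem.Set.ofList (keepLong m rr'.reverse)) := by
      have hinit : cullStep m (PySem.Set.empty, none, none) p
          = (PySem.Set.ofList (keepLong m (([] : List (Int × Int)).reverse)), some p, some (p + 1 - 1)) := by
        have e2 : p + 1 - 1 = p := by ring
        rw [e2]
        rfl
      unfold cull_runs
      rw [hE, List.foldl_cons, hinit, fold_corr m L' [] p 1 le_rfl, heq]
    -- starts of B = map fst P
    have hmapP : P.map Prod.fst = (s' :: rr'.map Prod.fst).reverse := by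
      simp [hP]
    have hpairP : List.Pairwise (· < ·) (P.map Prod.fst) := by
      rw [hmapP, List.pairwise_reverse]
      have h1 : List.Pairwise (fun a b => b.1 + b.2 < a.1) ((s', n') :: rr') := hpair
      have h2 : List.Pairwise (fun (a b : Int × Int) => b.1 < a.1) ((s', n') :: rr') := by
        refine List.Pairwise.imp_of_mem ?_ h1
        intro a b _ hb hab
        have : 1 ≤ b.2 := by
          rcases List.mem_cons.mp hb with h | h
          · rw [h]; exact hn1
          · exact (hgood b h).1
        omega
      have h3 : List.Pairwise (fun (a b : Int) => b < a) (((s', n') :: rr').map Prod.fst) :=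
        List.pairwise_map.mpr h2
      simpa using h3
    have hstarts : PySem.List.sorted (xs.filter (fun p => decide ((p - 1) ∉ xs)))
        (fun x => x) false = P.map Prod.fst := by
      apply PySem.List.sorted_eq_of_perm_of_pairwise_lt
      · apply (List.perm_ext_iff_of_nodup ?_ ?_).mpr
        · intro a
          rw [List.mem_filter, List.mem_map, decide_eq_true_iff]
          constructor
          · rintro ⟨q, hq, rfl⟩
            apply (hcharx q.1).mpr
            simp only [hP, List.mem_append, List.mem_reverse, List.mem_singleton] at hq
            rcases hq with h | h
            · right; exact List.mem_map.mpr ⟨q, h, rfl⟩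
            · left; rw [h]
          · intro h
            rcases (hcharx a).mp h with h' | h'
            · exact ⟨(s', n'), by simp [hP], h'.symm⟩
            · obtain ⟨q, hq, hq2⟩ := List.mem_map.mp h'
              exact ⟨q, by simp [hP, hq], hq2⟩
        · exact hpairP.imp (fun h => ne_of_lt h)
        · exact hnd.filter _
      · exact hpairP
    -- the walk computes each piece's end
    have hwalk : ∀ q ∈ P, walkEnd xs xs.length q.1 = q.1 + q.2 - 1 := by
      intro q hq
      have hgq : 1 ≤ q.2 ∧ (∀ c : Int, q.1 ≤ c → c ≤ q.1 + q.2 - 1 → c ∈ xs) ∧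
          (q.1 + q.2) ∉ xs := by
        simp only [hP, List.mem_append, List.mem_reverse, List.mem_singleton] at hq
        rcases hq with h | h
        · obtain ⟨a1, a2, _, a4⟩ := hgoodx q h
          exact ⟨a1, a2, a4⟩
        · subst h
          refine ⟨hn1, hrunx, ?_⟩
          intro h
          have := hubx _ h; omega
      obtain ⟨hq1, hq2, hq3⟩ := hgq
      -- fuel suffices: the interval's points are distinct members of xs
      have hsub : (PySem.List.pyRange q.1 (q.1 + q.2) 1).Subperm xs := by
        apply List.Nodup.subperm (PySem.List.nodup_pyRange_one _ _)
        intro c hc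
        rw [PySem.List.mem_pyRange_one] at hc
        exact hq2 c hc.1 (by omega)
      have hlen : (q.2).toNat ≤ xs.length := by
        have := hsub.length_le
        rwa [PySem.List.length_pyRange_one, show q.1 + q.2 - q.1 = q.2 by ring] at this
      apply walkEnd_reaches xs xs.length q.1 (q.1 + q.2 - 1) (by omega)
        (fun c h1 h2 => hq2 c h1 h2) (by rwa [show q.1 + q.2 - 1 + 1 = q.1 + q.2 by ring])
      omega
    -- compute B
    have hB : cull_runs_alt xs m =
        (if m ≤ n' then
          PySem.Set.update (PySem.Set.ofList (keepLong m rr'.reverse))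
            (PySem.List.pyRange s' (s' + n') 1)
        else PySem.Set.ofList (keepLong m rr'.reverse)) := by
      show (PySem.List.sorted ((PySem.Set.ofList xs).filter
            (fun p => decide ((p - 1) ∉ PySem.Set.ofList xs))) (fun x => x) false).foldl
          (fun answer a =>
            if m ≤ walkEnd (PySem.Set.ofList xs) (PySem.Set.ofList xs).length a - a + 1 then
              PySem.Set.update answer
                (PySem.List.pyRange a (walkEnd (PySem.Set.ofList xs) (PySem.Set.ofList xs).length a + 1) 1)
            else answer) PySem.Set.empty = _
      rw [hpts, hstarts, List.foldl_map]
      have hcongr : P.foldl (fun ans q =>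
            if m ≤ walkEnd xs xs.length q.1 - q.1 + 1 then
              PySem.Set.update ans (PySem.List.pyRange q.1 (walkEnd xs xs.length q.1 + 1) 1)
            else ans) PySem.Set.empty
          = P.foldl (fun ans q =>
            if m ≤ q.2 then PySem.Set.update ans (PySem.List.pyRange q.1 (q.1 + q.2) 1) else ans)
            PySem.Set.empty := by
        apply PySem.List.foldl_congr_mem
        intro acc q hq
        rw [hwalk q hq, show q.1 + q.2 - 1 - q.1 + 1 = q.2 by ring,
          show q.1 + q.2 - 1 + 1 = q.1 + q.2 by ring]
      rw [hcongr]
      have : PySem.Set.empty = PySem.Set.ofList ([] : List Int) := rfl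
      rw [this, flush_fold, List.nil_append, hP, keepLong_append, keepLong_singleton,
        ofList_append_int]
      by_cases hm : m ≤ n'
      · rw [if_pos hm, if_pos hm]
      · rw [if_neg hm, if_neg hm]
        simp [PySem.Set.update]
    have hse : s' ≤ s' + n' - 1 := by omega
    constructor
    · -- outside D_: equal
      intro hnd'
      by_cases hm : m ≤ n'
      · by_cases hz : s' = 0 ∨ s' + n' - 1 = 0
        · exfalso
          apply hnd'
          refine ⟨s' + n' - 1, hrunx _ hse le_rfl, hubx, s', hrunx _ le_rfl hse, hs1x,
            ?_, mul_eq_zero.mpr (by omega), by omega⟩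
          intro x hx h1 h2
          exact hrunx (x + 1) (by omega) (by omega)
        · have hcond : s' ≠ 0 ∧ s' + n' - 1 ≠ 0 ∧ m ≤ (s' + n' - 1) - s' + 1 := by
            rw [not_or] at hz
            exact ⟨hz.1, hz.2, by omega⟩
          rw [hA, hB, if_pos hcond, if_pos hm,
            show (s' + n' - 1) + 1 = s' + n' by ring]
      · have hcond : ¬ (s' ≠ 0 ∧ s' + n' - 1 ≠ 0 ∧ m ≤ (s' + n' - 1) - s' + 1) := by
          intro h; exact hm (by omega)
        rw [hA, hB, if_neg hcond, if_neg hm]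
    · -- inside D_: always different
      rintro ⟨b, hbmem, hbub, a, hamem, ha1, hclo, hab0, hlen⟩
      -- b is the maximum, so b = s' + n' - 1
      have hbe : b = s' + n' - 1 := by
        have h1 : b ≤ s' + n' - 1 := hubx b hbmem
        have h2 : s' + n' - 1 ≤ b := hbub _ (hrunx _ hse le_rfl)
        omega
      -- a is a run start reaching b, so a = s'
      have has : a = s' := by
        rcases (hcharx a).mp ⟨hamem, ha1⟩ with h | h
        · exact h
        · exfalso
          obtain ⟨q, hq, hqa⟩ := List.mem_map.mp h
          obtain ⟨g1, g2, _, g4⟩ := hgoodx q hq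
          have hlt : q.1 + q.2 < s' := hrrlt q hq
          -- the point q.1 + q.2 - 1 lies in xs, between a and b, so its successor is in xs
          have hin : q.1 + q.2 - 1 ∈ xs := g2 _ (by omega) le_rfl
          have hsucc : q.1 + q.2 - 1 + 1 ∈ xs := hclo _ hin (by omega) (by omega)
          rw [show q.1 + q.2 - 1 + 1 = q.1 + q.2 by ring] at hsucc
          exact g4 hsucc
      have hmn' : m ≤ n' := by omega
      have hz : s' = 0 ∨ s' + n' - 1 = 0 := by
        rcases mul_eq_zero.mp hab0 with h | h <;> omega
      have hcond : ¬ (s' ≠ 0 ∧ s' + n' - 1 ≠ 0 ∧ m ≤ (s' + n' - 1) - s' + 1) := by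
        rintro ⟨h1, h2, _⟩
        rcases hz with h | h
        · exact h1 h
        · exact h2 h
      rw [hA, hB, if_neg hcond, if_pos hmn']
      -- the maximum b is in B's output but not in A's
      intro hcontra
      have hbB : (s' + n' - 1) ∈ PySem.Set.update (PySem.Set.ofList (keepLong m rr'.reverse))
          (PySem.List.pyRange s' (s' + n') 1) := by
        apply (PySem.Set.mem_update ..).mpr
        right
        rw [PySem.List.mem_pyRange_one]
        omega
      rw [← hcontra] at hbB
      have hbA : (s' + n' - 1) ∉ PySem.Set.ofList (keepLong m rr'.reverse) := by
        intro h
        rw [PySem.Set.mem_ofList] at h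
        obtain ⟨q, hq, hqm⟩ := List.mem_flatMap.mp h
        have hq' : q ∈ rr' := by
          have := List.mem_filter.mp hq
          exact List.mem_reverse.mp this.1
        rw [PySem.List.mem_pyRange_one] at hqm
        have := hrrlt q hq'
        omega
      exact hbA hbB

-- ===== VERDICT (by name: the statement is the Claim_ definition above) =====
theorem cull_runs_spec : Claim_unchanged_cull_runs := by
  intro set_of_points min_run _hdom hpre
  unfold Spec_cull_runs
  exact (main_corr set_of_points min_run hpre).1

theorem cull_runs_changed : Claim_changed_cull_runs := by
  unfold Claim_changed_cull_runs; decide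

theorem cull_runs_tight : Claim_exact_cull_runs := by
  intro set_of_points min_run _hdom hpre hd
  exact (main_corr set_of_points min_run hpre).2 hd
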